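-- pv_equiv track=rewrite | github.com/palpalani/aws-open-guide | scripts/report_duplicate_md_links.py | within_file_duplicates
-- ===== SOURCE A (Python) =====
-- from collections import defaultdict
--
-- def within_file_duplicates(
--     links: list[tuple[str, str, int]],
-- ) -> dict[str, tuple[int, list[int]]]:
--     """URL -> (occurrence_count, sorted unique line numbers)."""
--     by_norm: dict[str, list[int]] = defaultdict(list)
--     for norm, _raw, line in links:
--         by_norm[norm].append(line)
--     return {
--         u: (len(lines), sorted(set(lines)))
--         for u, lines in by_norm.items()
--         if len(lines) >= 2
--     }
-- ===== SOURCE B (Python) =====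
-- def within_file_duplicates(
--     links: list[tuple[str, str, int]],
-- ) -> dict[str, tuple[int, list[int]]]:
--     """URL -> (occurrence_count, sorted unique line numbers)."""
--     result: dict[str, tuple[int, list[int]]] = {}
--     for norm in dict.fromkeys(n for n, _raw, _line in links):
--         lines = [line for n, _raw, line in links if n == norm]
--         if len(lines) >= 2:
--             result[norm] = (len(lines), sorted(set(lines)))
--     return result
-- ===== Notes on version B (the rewrite author's own statement) =====
-- stated objective: alternative
-- what changed: Replaces A's one-pass defaultdict grouping followed by a filtering dict comprehension with iterating the first-seen-deduplicated URLs and rescanning the link list once per distinct URL to collect its lines.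
import Mathlib
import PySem

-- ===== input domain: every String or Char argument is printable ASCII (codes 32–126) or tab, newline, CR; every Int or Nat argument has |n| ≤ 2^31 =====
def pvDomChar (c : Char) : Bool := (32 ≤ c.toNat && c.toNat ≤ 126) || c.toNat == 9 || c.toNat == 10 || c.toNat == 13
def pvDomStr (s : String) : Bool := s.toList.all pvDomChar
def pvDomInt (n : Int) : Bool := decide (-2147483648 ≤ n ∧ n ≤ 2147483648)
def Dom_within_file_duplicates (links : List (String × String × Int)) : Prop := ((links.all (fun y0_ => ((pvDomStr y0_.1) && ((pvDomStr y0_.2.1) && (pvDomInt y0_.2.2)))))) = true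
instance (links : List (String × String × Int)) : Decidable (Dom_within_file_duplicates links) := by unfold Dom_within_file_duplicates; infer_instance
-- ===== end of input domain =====

-- B replaces A's one-pass defaultdict grouping by iterating the deduplicated URLs (first-seen
-- order) and rescanning the link list once per distinct URL; same return value, no speed claim.

-- ===== PORT A =====
def within_file_duplicates (links : List (String × String × Int)) : List (String × Int × List Int) :=
  let by_norm : PySem.Dict String (List Int) :=
    links.foldl (fun d t => d.modify t.1 [] (fun v => v ++ [t.2.2])) PySem.Dict.empty
  (by_norm.items.foldl
    (fun (r : PySem.Dict String (Int × List Int)) p =>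
      if 2 ≤ p.2.length then
        r.insert p.1 ((p.2.length : Int), PySem.List.sorted (PySem.Set.ofList p.2) (fun x => x) false)
      else r)
    PySem.Dict.empty).items

-- ===== PORT B =====
def within_file_duplicates_alt (links : List (String × String × Int)) : List (String × Int × List Int) :=
  ((PySem.List.dedup (links.map (·.1))).foldl
    (fun (r : PySem.Dict String (Int × List Int)) norm =>
      let lines := (links.filter (fun t => t.1 == norm)).map (·.2.2)
      if 2 ≤ lines.length then
        r.insert norm ((lines.length : Int), PySem.List.sorted (PySem.Set.ofList lines) (fun x => x) false)
      else r)
    PySem.Dict.empty).items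

-- ===== PRECONDITION & SPEC =====
def Spec_within_file_duplicates (links : List (String × String × Int)) (out : List (String × Int × List Int)) : Prop := out = within_file_duplicates_alt links
instance (links : List (String × String × Int)) (out : List (String × Int × List Int)) : Decidable (Spec_within_file_duplicates links out) := by unfold Spec_within_file_duplicates; infer_instance

-- ===== CLAIM (what is proved, stated in full; the proofs are below) =====
def Claim_equal_within_file_duplicates : Prop := ∀ (links : List (String × String × Int)), Dom_within_file_duplicates links → Spec_within_file_duplicates links (within_file_duplicates links)

-- ===== LEMMAS AND PROOFS =====

-- A's grouping dict, as an association list: the distinct URLs in first-seen order,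
-- each paired with all its line numbers in input order.
theorem by_norm_items (links : List (String × String × Int)) :
    (links.foldl (fun d t => d.modify t.1 [] (fun v => v ++ [t.2.2]))
        (PySem.Dict.empty : PySem.Dict String (List Int))).items
      = (PySem.List.dedup (links.map (·.1))).map
          (fun u => (u, (links.filter (fun t => t.1 == u)).map (·.2.2))) := by
  have hfold : links.foldl (fun d t => d.modify t.1 [] (fun v => v ++ [t.2.2]))
      (PySem.Dict.empty : PySem.Dict String (List Int))
      = links.foldl (fun d t => d.modify ((·.1 : (String × String × Int) → String) t) []
          ((fun (_ : PySem.Dict String (List Int)) (t : String × String × Int) (v : List Int) => v ++ [t.2.2]) d t))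
        PySem.Dict.empty := rfl
  have hkeys := PySem.Dict.keys_foldl_modify_key links (·.1) []
      (fun _ t v => v ++ [t.2.2]) PySem.Dict.empty
  have hnodup := PySem.Dict.nodup_keys_foldl_modify_key links (·.1) []
      (fun _ t v => v ++ [t.2.2]) PySem.Dict.empty PySem.Dict.nodup_keys_empty
  rw [hfold, PySem.Dict.items_eq_map_keys _ hnodup [], hkeys]
  have hupd : PySem.Set.update (PySem.Dict.empty : PySem.Dict String (List Int)).keys (links.map (·.1))
      = PySem.List.dedup (links.map (·.1)) := by
    simp [PySem.List.dedup_eq_ofList, PySem.Set.update, PySem.Set.ofList_eq_foldl, PySem.Dict.empty,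
      PySem.Dict.keys]
  rw [hupd]
  refine List.map_congr_left (fun u _ => ?_)
  have hmap : links.foldl (fun d t => d.modify ((·.1 : (String × String × Int) → String) t) []
        ((fun (_ : PySem.Dict String (List Int)) (t : String × String × Int) (v : List Int) => v ++ [t.2.2]) d t))
        (PySem.Dict.empty : PySem.Dict String (List Int))
      = ((links.map (fun t => (t.1, t.2.2))).foldl
          (fun d p => d.modify p.1 [] (fun v => v ++ [p.2])) PySem.Dict.empty) := by
    rw [List.foldl_map]
  rw [hmap, PySem.Dict.getD_foldl_modify_append]
  simp [List.filter_map, Function.comp_def, List.map_map]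

-- ===== VERDICT (by name: the statement is the Claim_ definition above) =====
theorem within_file_duplicates_spec : Claim_equal_within_file_duplicates := by
  intro links _
  unfold Spec_within_file_duplicates within_file_duplicates within_file_duplicates_alt
  simp only [by_norm_items, List.foldl_map]
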